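-- pv_equiv track=rewrite | github.com/OmniNode-ai/omnibase_spi | scripts/intelligence_hook.py | _detect_architecture_patterns
-- ===== SOURCE A (Python) =====
-- from typing import Any, List, Optional, Sized, cast
--
-- def _detect_architecture_patterns(
--     file_changes: List[dict[str, Any]]
-- ) -> List[str]:
--     """Detect architectural patterns from file changes."""
--     patterns = []
--     filenames = [change.get("filename", "") for change in file_changes]
--
--     # Microservices patterns
--     if any("service" in f.lower() for f in filenames):
--         patterns.append("Microservices")
--
--     # API patterns
--     if any("api" in f.lower() or "endpoint" in f.lower() for f in filenames):
--         patterns.append("REST API")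
--
--     # Database patterns
--     if any(
--         "model" in f.lower() or "schema" in f.lower() or "migration" in f.lower()
--         for f in filenames
--     ):
--         patterns.append("Database Layer")
--
--     # Frontend patterns
--     if any(f.endswith((".tsx", ".jsx", ".vue", ".svelte")) for f in filenames):
--         patterns.append("Component-Based UI")
--
--     # Configuration patterns
--     if any(
--         f.endswith((".yml", ".yaml", ".toml", ".json")) and "config" in f.lower()
--         for f in filenames
--     ):
--         patterns.append("Configuration Management")
--
--     # Docker patterns
--     if any("docker" in f.lower() or f == "Dockerfile" for f in filenames):
--         patterns.append("Containerization")
--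
--     return patterns
-- ===== SOURCE B (Python) =====
-- from typing import Any, List
--
--
-- def _detect_architecture_patterns(
--     file_changes: List[dict[str, Any]]
-- ) -> List[str]:
--     """Detect architectural patterns from file changes (single pass over filenames)."""
--     svc = api = db = ui = cfg = dock = False
--     for change in file_changes:
--         f = change.get("filename", "")
--         lf = f.lower()
--         svc = svc or "service" in lf
--         api = api or "api" in lf or "endpoint" in lf
--         db = db or "model" in lf or "schema" in lf or "migration" in lf
--         ui = ui or f.endswith((".tsx", ".jsx", ".vue", ".svelte"))
--         cfg = cfg or (f.endswith((".yml", ".yaml", ".toml", ".json")) and "config" in lf)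
--         dock = dock or "docker" in lf or f == "Dockerfile"
--
--     patterns = []
--     if svc:
--         patterns.append("Microservices")
--     if api:
--         patterns.append("REST API")
--     if db:
--         patterns.append("Database Layer")
--     if ui:
--         patterns.append("Component-Based UI")
--     if cfg:
--         patterns.append("Configuration Management")
--     if dock:
--         patterns.append("Containerization")
--     return patterns
-- ===== Notes on version B (the rewrite author's own statement) =====
-- stated objective: alternative
-- what changed: Replaces six separate any()-scans over the filename list by a single pass that folds six boolean flags over the filenames, then emits the labels in the fixed order from the flags.
import Mathlib
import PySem

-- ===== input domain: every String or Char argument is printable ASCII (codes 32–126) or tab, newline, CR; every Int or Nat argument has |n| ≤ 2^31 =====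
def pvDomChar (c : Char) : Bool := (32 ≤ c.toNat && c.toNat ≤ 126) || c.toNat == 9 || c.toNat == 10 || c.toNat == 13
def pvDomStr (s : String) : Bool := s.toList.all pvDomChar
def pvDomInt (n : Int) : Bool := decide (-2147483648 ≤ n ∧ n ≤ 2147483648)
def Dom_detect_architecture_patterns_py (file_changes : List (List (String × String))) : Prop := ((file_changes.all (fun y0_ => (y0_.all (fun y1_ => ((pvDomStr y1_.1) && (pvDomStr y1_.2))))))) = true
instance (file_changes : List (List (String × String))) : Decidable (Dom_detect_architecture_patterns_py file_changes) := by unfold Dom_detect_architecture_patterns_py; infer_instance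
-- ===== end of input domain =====

-- Header: B merges A's six any()-scans of the filename list into one pass maintaining six boolean flags; the labels are appended in the same fixed order. Return-value equivalence; neither version mutates its argument.

-- ===== PORT A =====
-- change.get("filename", "")  (association list, first-match lookup)
def pvGetFilename (change : List (String × String)) : String :=
  ((change.find? (fun p => p.1 == "filename")).map Prod.snd).getD ""

def detect_architecture_patterns_py (file_changes : List (List (String × String))) : List String :=
  let filenames := file_changes.map pvGetFilename
  let patterns : List String := []
  let patterns := if filenames.any (fun f => PySem.Str.isIn "service" (PySem.Str.lower f))
    then patterns ++ ["Microservices"] else patterns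
  let patterns := if filenames.any (fun f => PySem.Str.isIn "api" (PySem.Str.lower f) || PySem.Str.isIn "endpoint" (PySem.Str.lower f))
    then patterns ++ ["REST API"] else patterns
  let patterns := if filenames.any (fun f => PySem.Str.isIn "model" (PySem.Str.lower f) || PySem.Str.isIn "schema" (PySem.Str.lower f) || PySem.Str.isIn "migration" (PySem.Str.lower f))
    then patterns ++ ["Database Layer"] else patterns
  let patterns := if filenames.any (fun f => PySem.Str.endswith f ".tsx" || PySem.Str.endswith f ".jsx" || PySem.Str.endswith f ".vue" || PySem.Str.endswith f ".svelte")
    then patterns ++ ["Component-Based UI"] else patterns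
  let patterns := if filenames.any (fun f => (PySem.Str.endswith f ".yml" || PySem.Str.endswith f ".yaml" || PySem.Str.endswith f ".toml" || PySem.Str.endswith f ".json") && PySem.Str.isIn "config" (PySem.Str.lower f))
    then patterns ++ ["Configuration Management"] else patterns
  let patterns := if filenames.any (fun f => PySem.Str.isIn "docker" (PySem.Str.lower f) || f == "Dockerfile")
    then patterns ++ ["Containerization"] else patterns
  patterns

-- ===== PORT B =====
-- one fold over file_changes maintaining the six flags (B's loop body)
def pvStep (s : Bool × Bool × Bool × Bool × Bool × Bool) (change : List (String × String)) :
    Bool × Bool × Bool × Bool × Bool × Bool :=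
  let f := pvGetFilename change
  let lf := PySem.Str.lower f
  ⟨s.1 || PySem.Str.isIn "service" lf,
   s.2.1 || PySem.Str.isIn "api" lf || PySem.Str.isIn "endpoint" lf,
   s.2.2.1 || PySem.Str.isIn "model" lf || PySem.Str.isIn "schema" lf || PySem.Str.isIn "migration" lf,
   s.2.2.2.1 || (PySem.Str.endswith f ".tsx" || PySem.Str.endswith f ".jsx" || PySem.Str.endswith f ".vue" || PySem.Str.endswith f ".svelte"),
   s.2.2.2.2.1 || ((PySem.Str.endswith f ".yml" || PySem.Str.endswith f ".yaml" || PySem.Str.endswith f ".toml" || PySem.Str.endswith f ".json") && PySem.Str.isIn "config" lf),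
   s.2.2.2.2.2 || PySem.Str.isIn "docker" lf || f == "Dockerfile"⟩

def detect_architecture_patterns_py_alt (file_changes : List (List (String × String))) : List String :=
  let s := file_changes.foldl pvStep ⟨false, false, false, false, false, false⟩
  (if s.1 then ["Microservices"] else []) ++
  (if s.2.1 then ["REST API"] else []) ++
  (if s.2.2.1 then ["Database Layer"] else []) ++
  (if s.2.2.2.1 then ["Component-Based UI"] else []) ++
  (if s.2.2.2.2.1 then ["Configuration Management"] else []) ++
  (if s.2.2.2.2.2 then ["Containerization"] else [])

-- ===== PRECONDITION & SPEC =====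
def Spec_detect_architecture_patterns_py (file_changes : List (List (String × String))) (out : List String) : Prop := out = detect_architecture_patterns_py_alt file_changes
instance (file_changes : List (List (String × String))) (out : List String) : Decidable (Spec_detect_architecture_patterns_py file_changes out) := by unfold Spec_detect_architecture_patterns_py; infer_instance

-- ===== CLAIM (what is proved, stated in full; the proofs are below) =====
def Claim_equal_detect_architecture_patterns_py : Prop := ∀ (file_changes : List (List (String × String))), Dom_detect_architecture_patterns_py file_changes → Spec_detect_architecture_patterns_py file_changes (detect_architecture_patterns_py file_changes)

-- ===== LEMMAS AND PROOFS =====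

-- the fold of the six flags computes, componentwise, 'initial flag || any(predicate)'
theorem pvStep_foldl (l : List (List (String × String))) :
    ∀ s : Bool × Bool × Bool × Bool × Bool × Bool,
    l.foldl pvStep s =
      ⟨s.1 || (l.map pvGetFilename).any (fun f => PySem.Str.isIn "service" (PySem.Str.lower f)),
       s.2.1 || (l.map pvGetFilename).any (fun f => PySem.Str.isIn "api" (PySem.Str.lower f) || PySem.Str.isIn "endpoint" (PySem.Str.lower f)),
       s.2.2.1 || (l.map pvGetFilename).any (fun f => PySem.Str.isIn "model" (PySem.Str.lower f) || PySem.Str.isIn "schema" (PySem.Str.lower f) || PySem.Str.isIn "migration" (PySem.Str.lower f)),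
       s.2.2.2.1 || (l.map pvGetFilename).any (fun f => PySem.Str.endswith f ".tsx" || PySem.Str.endswith f ".jsx" || PySem.Str.endswith f ".vue" || PySem.Str.endswith f ".svelte"),
       s.2.2.2.2.1 || (l.map pvGetFilename).any (fun f => (PySem.Str.endswith f ".yml" || PySem.Str.endswith f ".yaml" || PySem.Str.endswith f ".toml" || PySem.Str.endswith f ".json") && PySem.Str.isIn "config" (PySem.Str.lower f)),
       s.2.2.2.2.2 || (l.map pvGetFilename).any (fun f => PySem.Str.isIn "docker" (PySem.Str.lower f) || f == "Dockerfile")⟩ := by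
  induction l with
  | nil => intro s; simp
  | cons c t ih =>
    intro s
    simp only [List.foldl_cons, ih, List.map_cons, List.any_cons, pvStep]
    refine Prod.ext ?_ (Prod.ext ?_ (Prod.ext ?_ (Prod.ext ?_ (Prod.ext ?_ ?_)))) <;>
      simp [Bool.or_assoc]

-- ===== VERDICT (by name: the statement is the Claim_ definition above) =====
theorem detect_architecture_patterns_py_spec : Claim_equal_detect_architecture_patterns_py := by
  intro fc _
  show detect_architecture_patterns_py fc = detect_architecture_patterns_py_alt fc
  unfold detect_architecture_patterns_py detect_architecture_patterns_py_alt
  rw [pvStep_foldl]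
  simp only [Bool.false_or]
  split_ifs <;> rfl
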